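-- pv_equiv track=rewrite | github.com/GuzzDoritos/uem | fundamentos_de_algoritmos/repeticao/ex_extra_prova1_02.py | formatar_sobrenome_nome
-- ===== SOURCE A (Python) =====
-- def formatar_sobrenome_nome(nome: str) -> str:
--     '''
--     Recebe como entrada um nome (podendo conter sobrenome) e então separa o nome e sobrenome (se houver),
--     inserindo no formato "sobrenome, nome" e retornando como str.
--     Exemplos:
--     >>> formatar_sobrenome_nome(nome = "jose da silva")
--     'silva, jose da'
--     >>> formatar_sobrenome_nome(nome = "miku hatsune")
--     'hatsune, miku'
--     >>> formatar_sobrenome_nome(nome = "sonic the hedgehog")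
--     'hedgehog, sonic the'
--     '''
--
--     sobrenome_invertido: str = ""
--     conseguiu_sobrenome_invertido = False
--
--     nome_invertido: str = ""
--
--     for i in range(len(nome)):
--         if conseguiu_sobrenome_invertido == False:
--             if nome[-i - 1] == " ":
--                 conseguiu_sobrenome_invertido = True
--             else:
--                 sobrenome_invertido = sobrenome_invertido + nome[-i - 1]
--         else:
--             nome_invertido = nome_invertido + nome[-i -1]
--
--
--     sobrenome = inverter_str(sobrenome_invertido)
--     primeiro_nome = inverter_str(nome_invertido)
--
--     return sobrenome + ", " + primeiro_nome
--
-- def inverter_str(string: str) -> str: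
--     '''Recebe uma string como entrada, e então inverte os caracteres, retornando a string invertida.
--     Exemplos:
--     >>> inverter_str(string = "atenaçam")
--     'maçaneta'
--     '''
--
--     string_invertida: str = ""
--
--     for i in range(len(string)):
--         string_invertida = string_invertida + string[-i - 1]
--
--     return string_invertida
-- ===== SOURCE B (Python) =====
-- def formatar_sobrenome_nome(nome: str) -> str:
--     idx = nome.rfind(' ')
--     if idx == -1:
--         return nome + ', '
--     return nome[idx + 1:] + ', ' + nome[:idx]
-- ===== Notes on version B (the rewrite author's own statement) =====
-- stated objective: faster
-- what changed: Replaces the reverse-scan accumulator loop and the character-by-character string-reversal helper by a single rfind of the last space and two slices.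
import Mathlib
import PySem

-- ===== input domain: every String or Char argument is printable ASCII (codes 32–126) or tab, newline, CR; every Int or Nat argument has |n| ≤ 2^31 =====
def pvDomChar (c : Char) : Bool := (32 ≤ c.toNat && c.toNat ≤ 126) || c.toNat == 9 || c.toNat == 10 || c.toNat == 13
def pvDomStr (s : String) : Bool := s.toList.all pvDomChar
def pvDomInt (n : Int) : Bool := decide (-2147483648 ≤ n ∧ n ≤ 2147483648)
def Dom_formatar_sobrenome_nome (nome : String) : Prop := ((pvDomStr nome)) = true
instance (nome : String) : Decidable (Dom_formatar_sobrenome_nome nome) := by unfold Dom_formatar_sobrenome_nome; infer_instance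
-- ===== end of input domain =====

-- B replaces A's reverse-scan accumulator loops (and the inverter_str helper) by one rfind of the
-- last space and two slices; objective: simpler.


-- ===== PORT A =====

-- the body of A's loop: flag not yet set → accumulate surname chars / flip on space; flag set → accumulate first name
def pvStep (st : List Char × Bool × List Char) (c : Char) : List Char × Bool × List Char :=
  if st.2.1 = false then
    if c = ' ' then (st.1, true, st.2.2) else (st.1 ++ [c], false, st.2.2)
  else (st.1, st.2.1, st.2.2 ++ [c])

-- helper inverter_str: for i in range(len(s)): acc = acc + s[-i-1]
def inverter_str (s : List Char) : List Char :=
  (PySem.List.pyRange 0 (s.length : Int) 1).foldl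
    (fun acc i => acc ++ [PySem.List.pyGetD s (-i - 1) ' ']) []

def formatar_sobrenome_nome (nome : String) : String :=
  let l := nome.toList
  let st := (PySem.List.pyRange 0 (l.length : Int) 1).foldl
      (fun st i => pvStep st (PySem.List.pyGetD l (-i - 1) ' '))
      (([] : List Char), false, ([] : List Char))
  String.ofList (inverter_str st.1 ++ (", ").toList ++ inverter_str st.2.2)

-- ===== PORT B =====

def formatar_sobrenome_nome_alt (nome : String) : String :=
  let idx := PySem.Str.rfind nome " "
  if idx = -1 then
    String.ofList (nome.toList ++ (", ").toList)
  else
    String.ofList (PySem.List.slice nome.toList (some (idx + 1)) none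
      ++ (", ").toList ++ PySem.List.slice nome.toList none (some idx))

-- ===== PRECONDITION & SPEC =====
def Spec_formatar_sobrenome_nome (nome : String) (out : String) : Prop := out = formatar_sobrenome_nome_alt nome
instance (nome : String) (out : String) : Decidable (Spec_formatar_sobrenome_nome nome out) := by unfold Spec_formatar_sobrenome_nome; infer_instance

-- ===== CLAIM (what is proved, stated in full; the proofs are below) =====
def Claim_equal_formatar_sobrenome_nome : Prop := ∀ (nome : String), Dom_formatar_sobrenome_nome nome → Spec_formatar_sobrenome_nome nome (formatar_sobrenome_nome nome)

-- ===== LEMMAS AND PROOFS =====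

-- nome[-i-1] is the i-th char of the reversed list
theorem pvGetRev (l : List Char) (i : Int) (h0 : 0 ≤ i) (h1 : i < (l.length : Int)) :
    PySem.List.pyGetD l (-i - 1) ' ' = PySem.List.pyGetD l.reverse i ' ' := by
  have h2 : (-i - 1) = -(((i.toNat + 1 : Nat)) : Int) := by push_cast; omega
  rw [h2, PySem.List.pyGetD_neg_natCast l (i.toNat + 1) ' ' (by omega) (by omega)]
  rw [PySem.List.pyGetD_eq_getElem l.reverse ' ' h0 (by simpa using h1)]
  rw [List.getElem_reverse]
  simp [Nat.sub_sub, Nat.add_comm]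

-- a 'for i in range(len(l)): … l[-i-1] …' loop is a fold over l.reverse
theorem pvLoopRev {σ : Type} (f : σ → Char → σ) (l : List Char) (init : σ) :
    (PySem.List.pyRange 0 (l.length : Int) 1).foldl
      (fun st i => f st (PySem.List.pyGetD l (-i - 1) ' ')) init
    = l.reverse.foldl f init := by
  rw [PySem.List.foldl_congr_mem _ _ (fun st i => f st (PySem.List.pyGetD l.reverse i ' ')) init
      (by
        intro acc i hi
        rw [PySem.List.mem_pyRange_one] at hi
        rw [pvGetRev l i hi.1 hi.2])]
  have hlen : (l.length : Int) = (l.reverse.length : Int) := by simp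
  rw [hlen]
  exact PySem.List.foldl_pyRange_zero_pyGetD' l.reverse ' ' f init

theorem pvInvEq (s : List Char) : inverter_str s = s.reverse := by
  unfold inverter_str
  rw [pvLoopRev (fun acc c => acc ++ [c]) s []]
  rw [PySem.List.foldl_append_singleton]
  simp

-- once the flag is set, the loop just appends everything
theorem pvStepTrue (r : List Char) (a b : List Char) :
    r.foldl pvStep (a, true, b) = (a, true, b ++ r) := by
  induction r generalizing b with
  | nil => simp
  | cons c r ih => simp [pvStep, ih]

-- closed form of A's scan over the reversed name
theorem pvStepFalse (r : List Char) (a b : List Char) :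
    r.foldl pvStep (a, false, b)
    = if ' ' ∈ r then
        (a ++ r.takeWhile (· != ' '), true, b ++ (r.dropWhile (· != ' ')).tail)
      else (a ++ r, false, b) := by
  induction r generalizing a with
  | nil => simp
  | cons c r ih =>
    by_cases hc : c = ' '
    · subst hc
      rw [List.foldl_cons, show pvStep (a, false, b) ' ' = (a, true, b) from by simp [pvStep],
        pvStepTrue]
      simp
    · have hcs : ¬ (' ' = c) := fun h => hc h.symm
      rw [List.foldl_cons, show pvStep (a, false, b) c = (a ++ [c], false, b) from by
        simp [pvStep, hc], ih (a ++ [c])]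
      have hp : (c != ' ') = true := by simp [hc]
      by_cases hm : ' ' ∈ r
      · simp [hm, hcs, hp, List.append_assoc]
      · simp [hm, hcs]

theorem pvPfxAppend (s : List Char) (c : Char) (h : s ≠ []) :
    ([' '].isPrefixOf (s ++ [c])) = ([' '].isPrefixOf s) := by
  cases s with
  | nil => exact absurd rfl h
  | cons x xs => simp [List.isPrefixOf]

theorem pvPfxSingle (c : Char) (hc : c ≠ ' ') : ([' '].isPrefixOf [c]) = false := by
  have h : (' ' == c) = false := beq_eq_false_iff_ne.mpr (Ne.symm hc)
  simp [List.isPrefixOf, h]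

theorem pvGoAppend (l : List Char) (c : Char) (hc : c ≠ ' ') :
    ∀ j, j ≤ l.length →
      PySem.Chars.rfind.go (l ++ [c]) [' '] j = PySem.Chars.rfind.go l [' '] j := by
  intro j
  induction j with
  | zero =>
    intro _
    simp only [PySem.Chars.rfind.go]
    cases l with
    | nil => simp [pvPfxSingle c hc, List.isPrefixOf]
    | cons x xs => rw [pvPfxAppend (x :: xs) c (by simp)]
  | succ j ih =>
    intro hj
    simp only [PySem.Chars.rfind.go]
    rw [ih (by omega)]
    by_cases hend : l.length ≤ j + 1
    · have h1 : List.drop (j + 1) l = [] := by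
        simp [List.drop_eq_nil_iff]; omega
      have he : j + 1 = l.length := by omega
      have h2 : List.drop (j + 1) (l ++ [c]) = [c] := by
        rw [he, List.drop_left]
      rw [h1, h2, pvPfxSingle c hc]
      simp [List.isPrefixOf]
    · have h1 : List.drop (j + 1) (l ++ [c]) = List.drop (j + 1) l ++ [c] :=
        List.drop_append_of_le_length (by omega)
      have hne : List.drop (j + 1) l ≠ [] := by
        simp [List.drop_eq_nil_iff]; omega
      rw [h1, pvPfxAppend _ c hne]

theorem pvRfindAppend (l : List Char) (c : Char) :
    PySem.Chars.rfind (l ++ [c]) [' ']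
    = if c = ' ' then (l.length : Int) else PySem.Chars.rfind l [' '] := by
  unfold PySem.Chars.rfind
  have hlen : (l ++ [c]).length = l.length + 1 := by simp
  rw [hlen]
  simp only [PySem.Chars.rfind.go]
  have h0 : List.drop (l.length + 1) (l ++ [c]) = [] := by
    simp
  rw [h0, if_neg (by decide : ¬ (([' '] : List Char).isPrefixOf [] = true))]
  by_cases hc : c = ' '
  · subst hc
    rw [if_pos rfl]
    cases l with
    | nil => decide
    | cons x xs =>
      have hlx : (x :: xs).length = xs.length + 1 := rfl
      rw [hlx]
      simp only [PySem.Chars.rfind.go]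
      have h2 : List.drop (xs.length + 1) ((x :: xs) ++ [' ']) = [' '] := by
        have h3 : xs.length + 1 = (x :: xs).length := rfl
        rw [h3, List.drop_left]
      rw [h2]
      simp [List.isPrefixOf]
  · rw [if_neg hc, pvGoAppend l c hc l.length (le_refl _)]

theorem pvRfindNoSpace (l : List Char) (h : ' ' ∉ l) : PySem.Chars.rfind l [' '] = -1 := by
  induction l using List.reverseRecOn with
  | nil => decide
  | append_singleton l c ih =>
    have hc : c ≠ ' ' := by intro hc; exact h (by simp [hc])
    rw [pvRfindAppend, if_neg hc]
    exact ih (fun hm => h (by simp [hm]))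

theorem pvRfindLastSpace (t : List Char) (u : List Char) (h : ' ' ∉ t) :
    PySem.Chars.rfind (u ++ ' ' :: t) [' '] = (u.length : Int) := by
  induction t using List.reverseRecOn with
  | nil => rw [pvRfindAppend]; simp
  | append_singleton t' c ih =>
    have hc : c ≠ ' ' := by intro hc; exact h (by simp [hc])
    have hre : u ++ ' ' :: (t' ++ [c]) = (u ++ ' ' :: t') ++ [c] := by simp
    rw [hre, pvRfindAppend, if_neg hc]
    exact ih (fun hm => h (by simp [hm]))

-- ===== VERDICT (by name: the statement is the Claim_ definition above) =====
theorem formatar_sobrenome_nome_spec : Claim_equal_formatar_sobrenome_nome := by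
  intro nome _
  unfold Spec_formatar_sobrenome_nome
  simp only [formatar_sobrenome_nome, formatar_sobrenome_nome_alt]
  rw [PySem.Str.rfind_eq]
  have hsp : (" " : String).toList = [' '] := by decide
  rw [hsp]
  set l := nome.toList with hl
  rw [pvLoopRev pvStep l ([], false, [])]
  rw [pvStepFalse l.reverse [] []]
  by_cases h : ' ' ∈ l
  · -- there is a space: split the reversed name at its first space
    have hr : ' ' ∈ l.reverse := List.mem_reverse.mpr h
    rw [if_pos hr]
    have hdne : l.reverse.dropWhile (· != ' ') ≠ [] := by
      intro hnil
      have h2 := List.dropWhile_eq_nil_iff.mp hnil ' ' hr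
      simp at h2
    obtain ⟨y, u, hdu⟩ := List.exists_cons_of_ne_nil hdne
    have hhead : (l.reverse.dropWhile (· != ' ')).head hdne = y := by simp [hdu]
    have hy : y = ' ' := by
      have h' := List.head_dropWhile_not (· != ' ') (w := hdne)
      rw [hhead] at h'
      simpa using h'
    subst hy
    have htail : (l.reverse.dropWhile (· != ' ')).tail = u := by rw [hdu]; rfl
    have hrdec : l.reverse = l.reverse.takeWhile (· != ' ') ++ ' ' :: u := by
      conv_lhs => rw [← List.takeWhile_append_dropWhile (p := (· != ' ')) (l := l.reverse)]
      rw [hdu]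
    have hldec : l = u.reverse ++ ' ' :: (l.reverse.takeWhile (· != ' ')).reverse := by
      have h3 := congrArg List.reverse hrdec
      simpa using h3
    have htns : ' ' ∉ (l.reverse.takeWhile (· != ' ')).reverse := by
      intro hm
      have h4 := List.mem_takeWhile_imp (List.mem_reverse.mp hm)
      simp at h4
    have hidx : PySem.Chars.rfind l [' '] = (u.reverse.length : Int) := by
      conv_lhs => rw [hldec]
      exact pvRfindLastSpace _ u.reverse htns
    rw [hidx, if_neg (by omega)]
    have hslice1 : PySem.List.slice l (some ((u.reverse.length : Int) + 1)) none
        = (l.reverse.takeWhile (· != ' ')).reverse := by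
      rw [PySem.List.slice_from l (by omega)]
      have h1 : (((u.reverse.length : Int)) + 1).toNat = u.reverse.length + 1 := by omega
      rw [h1]
      conv_lhs => rw [hldec]
      have h2 : u.reverse ++ ' ' :: (l.reverse.takeWhile (· != ' ')).reverse
          = (u.reverse ++ [' ']) ++ (l.reverse.takeWhile (· != ' ')).reverse := by simp
      rw [h2]
      have h3 : u.reverse.length + 1 = (u.reverse ++ [' ']).length := by simp
      rw [h3, List.drop_left]
    have hslice2 : PySem.List.slice l none (some ((u.reverse.length : Int))) = u.reverse := by
      rw [PySem.List.slice_to l (by omega)]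
      have h1 : ((u.reverse.length : Int)).toNat = u.reverse.length := by omega
      rw [h1]
      conv_lhs => rw [hldec]
      rw [List.take_left]
    rw [hslice1, hslice2, htail]
    simp [pvInvEq]
  · -- no space: A returns the whole name, B's rfind is -1
    have hr : ' ' ∉ l.reverse := fun hm => h (List.mem_reverse.mp hm)
    rw [if_neg hr, pvRfindNoSpace l h, if_pos rfl]
    simp [pvInvEq]
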